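-- pv_equiv track=rewrite | github.com/pobiedimska/datascience | oliinykao/recursion.py | recursion
-- ===== SOURCE A (Python) =====
-- def recursion(dataset, list_of_keys, count = 0, brand_list = [], n = 0):
--     if n >= len(dataset):
--         return count
--     else:
--         if (dataset.get(list_of_keys[n]).get("colors") == "Red") & (dataset.get(list_of_keys[n]).get("brand") not in brand_list):
--             count += 1
--             brand_list.append(dataset.get(list_of_keys[n]).get("brand"))
--         return recursion(dataset, list_of_keys, count, brand_list, n+1)
-- ===== SOURCE B (Python) =====
-- def recursion(dataset, list_of_keys, count = 0, brand_list = [], n = 0):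
--     # Iterative re-implementation: explicit loop instead of tail recursion,
--     # entry looked up once per key instead of three .get chains.
--     for i in range(n, len(dataset)):
--         entry = dataset.get(list_of_keys[i])
--         if entry.get("colors") == "Red" and entry.get("brand") not in brand_list:
--             count += 1
--             brand_list.append(entry.get("brand"))
--     return count
-- ===== Notes on version B (the rewrite author's own statement) =====
-- stated objective: simpler
-- what changed: Replaces deep tail recursion (with three repeated dataset.get chains per element) by a single explicit for-loop over range(n, len(dataset)) that looks the entry up once; same counting and same in-place append to brand_list.
import Mathlib
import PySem

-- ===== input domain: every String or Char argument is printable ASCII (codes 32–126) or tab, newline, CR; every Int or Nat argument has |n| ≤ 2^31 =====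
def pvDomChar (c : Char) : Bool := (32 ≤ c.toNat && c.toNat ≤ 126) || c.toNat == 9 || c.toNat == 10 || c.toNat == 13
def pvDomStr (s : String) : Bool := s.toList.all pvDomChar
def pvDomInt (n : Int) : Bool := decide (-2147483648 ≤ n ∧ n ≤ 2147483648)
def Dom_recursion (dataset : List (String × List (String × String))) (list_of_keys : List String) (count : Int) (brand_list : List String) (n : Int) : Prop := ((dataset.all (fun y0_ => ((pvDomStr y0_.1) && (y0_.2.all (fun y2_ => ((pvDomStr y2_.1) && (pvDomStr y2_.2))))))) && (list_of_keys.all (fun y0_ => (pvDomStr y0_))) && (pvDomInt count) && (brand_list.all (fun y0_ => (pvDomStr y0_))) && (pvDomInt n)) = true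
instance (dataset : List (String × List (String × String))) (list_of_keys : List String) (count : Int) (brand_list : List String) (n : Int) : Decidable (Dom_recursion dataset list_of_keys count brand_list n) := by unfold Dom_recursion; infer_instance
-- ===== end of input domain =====

-- B replaces A's tail recursion by one explicit loop with a (count, seen-brands) accumulator,
-- looking each entry up once ("simpler"); both A and B append to the caller's brand_list in
-- place in Python — the equivalence proved here is about the RETURN value.


-- ===== PORT A =====
-- The Python brand_list may receive None (entry with colors=="Red" and no "brand" key is
-- appended as None and later compared), so the internal state is List (Option String);
-- the String parameter is injected with .map some.  The `none => 0` arms are where Python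
-- raises IndexError / AttributeError — excluded by Pre_recursion.
def recursionAux (ds : List (String × List (String × String))) (keys : List String) (count : Int) (bl : List (Option String)) (n : Int) : Int :=
  if _h : (ds.length : Int) ≤ n then count
  else
    match PySem.List.pyGet? keys n with
    | none => 0      -- Python: IndexError on list_of_keys[n]
    | some key =>
      match List.lookup key ds with
      | none => 0    -- Python: AttributeError (dataset.get(...) is None)
      | some entry =>
        if List.lookup "colors" entry == some "Red" && !(bl.contains (List.lookup "brand" entry)) then
          recursionAux ds keys (count + 1) (bl ++ [List.lookup "brand" entry]) (n + 1)
        else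
          recursionAux ds keys count bl (n + 1)
termination_by ((ds.length : Int) - n).toNat
decreasing_by all_goals omega

def recursion (dataset : List (String × List (String × String))) (list_of_keys : List String) (count : Int) (brand_list : List String) (n : Int) : Int :=
  recursionAux dataset list_of_keys count (brand_list.map some) n

-- ===== PORT B =====
-- Source B's for-loop over range(n, len(dataset)) as a foldl; the `none` arms keep the state
-- unchanged where Python would raise (excluded by Pre_recursion).
def recursion_alt (dataset : List (String × List (String × String))) (list_of_keys : List String) (count : Int) (brand_list : List String) (n : Int) : Int :=
  ((PySem.List.pyRange n (dataset.length : Int) 1).foldl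
    (fun (st : Int × List (Option String)) i =>
      match PySem.List.pyGet? list_of_keys i with
      | none => st
      | some key =>
        match List.lookup key dataset with
        | none => st
        | some entry =>
          if List.lookup "colors" entry == some "Red" && !(st.2.contains (List.lookup "brand" entry)) then
            (st.1 + 1, st.2 ++ [List.lookup "brand" entry])
          else st)
    (count, brand_list.map some)).1

-- ===== PRECONDITION & SPEC =====
-- Pre_ excludes exactly the inputs where Python A raises: an index i in [n, len(dataset))
-- for which list_of_keys[i] is out of range (IndexError) or its key is absent from dataset
-- (AttributeError on None.get).
-- (The leading bound conjuncts are implied by the ∀ whenever the range is nonempty — they only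
-- let the Decidable instance refuse a huge empty-of-valid-indices range without enumerating it.)
def Pre_recursion (dataset : List (String × List (String × String))) (list_of_keys : List String) (count : Int) (brand_list : List String) (n : Int) : Prop :=
  (dataset.length : Int) ≤ n ∨
  (-(list_of_keys.length : Int) ≤ n ∧ (dataset.length : Int) ≤ (list_of_keys.length : Int) ∧
   ∀ i ∈ PySem.List.pyRange n (dataset.length : Int) 1,
     ((PySem.List.pyGet? list_of_keys i).bind (fun key => List.lookup key dataset)).isSome = true)
instance (dataset : List (String × List (String × String))) (list_of_keys : List String) (count : Int) (brand_list : List String) (n : Int) : Decidable (Pre_recursion dataset list_of_keys count brand_list n) := by unfold Pre_recursion; infer_instance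

def pvWitness_recursion : (List (String × List (String × String))) × List String × Int × List String × Int :=
  ([("k1", [("colors", "Red"), ("brand", "b1")]), ("k2", [("colors", "Blue")])], ["k1", "k2"], 0, [], 0)

def Spec_recursion (dataset : List (String × List (String × String))) (list_of_keys : List String) (count : Int) (brand_list : List String) (n : Int) (out : Int) : Prop := out = recursion_alt dataset list_of_keys count brand_list n
instance (dataset : List (String × List (String × String))) (list_of_keys : List String) (count : Int) (brand_list : List String) (n : Int) (out : Int) : Decidable (Spec_recursion dataset list_of_keys count brand_list n out) := by unfold Spec_recursion; infer_instance

-- ===== CLAIM (what is proved, stated in full; the proofs are below) =====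
def Claim_equal_recursion : Prop := ∀ (dataset : List (String × List (String × String))) (list_of_keys : List String) (count : Int) (brand_list : List String) (n : Int), Dom_recursion dataset list_of_keys count brand_list n → Pre_recursion dataset list_of_keys count brand_list n → Spec_recursion dataset list_of_keys count brand_list n (recursion dataset list_of_keys count brand_list n)

-- ===== LEMMAS AND PROOFS =====
lemma recursion_aux_eq (ds : List (String × List (String × String))) (keys : List String) :
    ∀ (k : Nat) (n : Int), (((ds.length : Int) - n).toNat = k) →
    ∀ (count : Int) (bl : List (Option String)),
    (∀ i ∈ PySem.List.pyRange n (ds.length : Int) 1,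
      ((PySem.List.pyGet? keys i).bind (fun key => List.lookup key ds)).isSome = true) →
    recursionAux ds keys count bl n =
      ((PySem.List.pyRange n (ds.length : Int) 1).foldl
        (fun (st : Int × List (Option String)) i =>
          match PySem.List.pyGet? keys i with
          | none => st
          | some key =>
            match List.lookup key ds with
            | none => st
            | some entry =>
              if List.lookup "colors" entry == some "Red" && !(st.2.contains (List.lookup "brand" entry)) then
                (st.1 + 1, st.2 ++ [List.lookup "brand" entry])
              else st)
        (count, bl)).1 := by
  intro k
  induction k with
  | zero =>
    intro n hk count bl _hpre
    have hle : (ds.length : Int) ≤ n := by omega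
    rw [recursionAux, PySem.List.pyRange_one_eq_nil hle]
    simp [hle]
  | succ k ih =>
    intro n hk count bl hpre
    have hlt : n < (ds.length : Int) := by omega
    rw [recursionAux, PySem.List.pyRange_one_cons hlt]
    have hn : ((PySem.List.pyGet? keys n).bind (fun key => List.lookup key ds)).isSome = true := by
      apply hpre
      rw [PySem.List.pyRange_one_cons hlt]; exact List.mem_cons_self
    have hpre' : ∀ i ∈ PySem.List.pyRange (n + 1) (ds.length : Int) 1,
        ((PySem.List.pyGet? keys i).bind (fun key => List.lookup key ds)).isSome = true := by
      intro i hi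
      apply hpre
      rw [PySem.List.pyRange_one_cons hlt]
      exact List.mem_cons_of_mem _ hi
    simp only [not_le.mpr hlt, List.foldl_cons]
    cases hget : PySem.List.pyGet? keys n with
    | none => simp [hget] at hn
    | some key =>
      cases hlook : List.lookup key ds with
      | none => simp [hget, hlook] at hn
      | some entry =>
        simp only [hlook]
        by_cases hc : (List.lookup "colors" entry == some "Red" && !(bl.contains (List.lookup "brand" entry))) = true
        · simp only [hc]
          exact ih (n + 1) (by omega) (count + 1) (bl ++ [List.lookup "brand" entry]) hpre'
        · simp only [hc, Bool.false_eq_true]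
          exact ih (n + 1) (by omega) count bl hpre'

-- ===== VERDICT (by name: the statement is the Claim_ definition above) =====
theorem recursion_spec : Claim_equal_recursion := by
  intro dataset list_of_keys count brand_list n _hdom hpre
  have hpre' : ∀ i ∈ PySem.List.pyRange n (dataset.length : Int) 1,
      ((PySem.List.pyGet? list_of_keys i).bind (fun key => List.lookup key dataset)).isSome = true := by
    rcases hpre with hle | ⟨_, _, h⟩
    · intro i hi
      rw [PySem.List.pyRange_one_eq_nil hle] at hi
      cases hi
    · exact h
  unfold Spec_recursion recursion recursion_alt
  exact recursion_aux_eq dataset list_of_keys _ n rfl count (brand_list.map some) hpre'
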